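-- pv_equiv track=rewrite | github.com/MaximilianAnzinger/Lotus | tests/util/test_cli.py | _setup_plot_regex_generator
-- ===== SOURCE A (Python) =====
-- plot_regex = {
--     "start-label": r"SETUP: START -*\n\n",
--     "print-titles": r"Print titles: \(y/n\) -*\n",
--     "select-plot": r"Select plot: -*\n",
--     "option-label": r".*\n",
--     "select-plot-invalid": r"Please select a number between 0 and ",
--     "end-label": r"SETUP: COMPLETE -*\n\n",
-- }
--
-- def _setup_plot_regex_generator(invalid_titles=0, invalid_ids=0, max_id=0):
--     out = plot_regex["start-label"]
--     for i in range(invalid_titles + 1):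
--         out += plot_regex["print-titles"]
--     out += r"\n"
--     for i in range(invalid_ids + 1):
--         out += plot_regex["select-plot"]
--         for j in range(max_id + 1):
--             out += str(j) + r" - " + plot_regex["option-label"]
--         if i != invalid_ids:
--             out += plot_regex["select-plot-invalid"] + str(max_id) + r"\n"
--
--     out += plot_regex["end-label"]
--     return out
-- ===== SOURCE B (Python) =====
-- plot_regex = {
--     "start-label": r"SETUP: START -*\n\n",
--     "print-titles": r"Print titles: \(y/n\) -*\n",
--     "select-plot": r"Select plot: -*\n",
--     "option-label": r".*\n",
--     "select-plot-invalid": r"Please select a number between 0 and ",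
--     "end-label": r"SETUP: COMPLETE -*\n\n",
-- }
--
-- def _setup_plot_regex_generator(invalid_titles=0, invalid_ids=0, max_id=0):
--     reps = invalid_ids + 1
--     if reps > 0:
--         block = plot_regex["select-plot"] + "".join(
--             str(j) + r" - " + plot_regex["option-label"] for j in range(max_id + 1))
--         sep = plot_regex["select-plot-invalid"] + str(max_id) + r"\n"
--         middle = sep.join([block] * reps)
--     else:
--         middle = ""
--     return (plot_regex["start-label"]
--             + plot_regex["print-titles"] * (invalid_titles + 1)
--             + r"\n"
--             + middle
--             + plot_regex["end-label"])
-- ===== Notes on version B (the rewrite author's own statement) =====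
-- stated objective: simpler
-- what changed: Replaces the outer loop with the trailing conditional by the observation that 'select-plot-invalid'+str(max_id)+'\n' is a separator between repeated identical blocks: B precomputes the per-plot block once and assembles the result as start + titles*(invalid_titles+1) + '\n' + sep.join([block]*(invalid_ids+1)) + end, with no per-iteration branch.
import Mathlib
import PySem

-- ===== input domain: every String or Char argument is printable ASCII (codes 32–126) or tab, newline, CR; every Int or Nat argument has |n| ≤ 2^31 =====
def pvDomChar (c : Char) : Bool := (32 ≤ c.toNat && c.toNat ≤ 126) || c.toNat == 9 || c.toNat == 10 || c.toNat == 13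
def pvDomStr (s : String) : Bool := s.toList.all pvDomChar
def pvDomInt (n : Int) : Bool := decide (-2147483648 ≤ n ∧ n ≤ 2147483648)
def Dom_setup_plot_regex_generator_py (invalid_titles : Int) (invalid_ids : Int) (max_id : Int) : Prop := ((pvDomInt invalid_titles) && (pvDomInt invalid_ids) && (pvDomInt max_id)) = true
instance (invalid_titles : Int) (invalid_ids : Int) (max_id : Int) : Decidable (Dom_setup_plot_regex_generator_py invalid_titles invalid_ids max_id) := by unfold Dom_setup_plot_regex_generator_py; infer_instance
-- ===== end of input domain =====

-- B replaces A's outer loop with its per-iteration conditional by one join over a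
-- repeated precomputed block with 'select-plot-invalid'+str(max_id)+'\n' as separator (objective: simpler).

-- the plot_regex dict entries (all raw strings in Python: '\n' is a literal backslash + 'n')
def prStart : String := "SETUP: START -*\\n\\n"
def prTitles : String := "Print titles: \\(y/n\\) -*\\n"
def prSelect : String := "Select plot: -*\\n"
def prOption : String := ".*\\n"
def prInvalid : String := "Please select a number between 0 and "
def prEnd : String := "SETUP: COMPLETE -*\\n\\n"

-- ===== PORT A =====
def setup_plot_regex_generator_py (invalid_titles : Int) (invalid_ids : Int) (max_id : Int) : String :=
  let out := prStart
  let out := (PySem.List.pyRange 0 (invalid_titles + 1) 1).foldl (fun acc _ => acc ++ prTitles) out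
  let out := out ++ "\\n"
  let out := (PySem.List.pyRange 0 (invalid_ids + 1) 1).foldl (fun acc i =>
      let acc := acc ++ prSelect
      let acc := (PySem.List.pyRange 0 (max_id + 1) 1).foldl
        (fun a j => a ++ (PySem.Int.toStr j ++ " - " ++ prOption)) acc
      if i ≠ invalid_ids then acc ++ (prInvalid ++ PySem.Int.toStr max_id ++ "\\n") else acc) out
  out ++ prEnd

-- ===== PORT B =====
-- ''.join(...)
def strJoin : List String → String
  | [] => ""
  | x :: xs => x ++ strJoin xs

-- sep.join(...)
def joinSep (sep : String) : List String → String
  | [] => ""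
  | [x] => x
  | x :: y :: xs => x ++ sep ++ joinSep sep (y :: xs)

-- Python 's * n' (n ≤ 0 gives '')
def strRepeat (s : String) (n : Int) : String := strJoin (List.replicate n.toNat s)

def setup_plot_regex_generator_py_alt (invalid_titles : Int) (invalid_ids : Int) (max_id : Int) : String :=
  let reps := invalid_ids + 1
  let middle :=
    if reps > 0 then
      joinSep (prInvalid ++ PySem.Int.toStr max_id ++ "\\n")
        (List.replicate reps.toNat
          (prSelect ++ strJoin ((PySem.List.pyRange 0 (max_id + 1) 1).map
            (fun j => PySem.Int.toStr j ++ " - " ++ prOption))))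
    else ""
  prStart ++ strRepeat prTitles (invalid_titles + 1) ++ "\\n" ++ middle ++ prEnd

-- ===== PRECONDITION & SPEC =====
def Spec_setup_plot_regex_generator_py (invalid_titles : Int) (invalid_ids : Int) (max_id : Int) (out : String) : Prop := out = setup_plot_regex_generator_py_alt invalid_titles invalid_ids max_id
instance (invalid_titles : Int) (invalid_ids : Int) (max_id : Int) (out : String) : Decidable (Spec_setup_plot_regex_generator_py invalid_titles invalid_ids max_id out) := by unfold Spec_setup_plot_regex_generator_py; infer_instance

-- ===== CLAIM (what is proved, stated in full; the proofs are below) =====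
def Claim_equal_setup_plot_regex_generator_py : Prop := ∀ (invalid_titles : Int) (invalid_ids : Int) (max_id : Int), Dom_setup_plot_regex_generator_py invalid_titles invalid_ids max_id → Spec_setup_plot_regex_generator_py invalid_titles invalid_ids max_id (setup_plot_regex_generator_py invalid_titles invalid_ids max_id)

-- ===== LEMMAS AND PROOFS =====

/-- A fold that appends `f x` for each element is the accumulator followed by the join of the maps. -/
theorem foldl_append_strJoin (f : Int → String) : ∀ (l : List Int) (acc : String),
    l.foldl (fun a x => a ++ f x) acc = acc ++ strJoin (l.map f)
  | [], acc => by simp [strJoin]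
  | x :: xs, acc => by
    simp only [List.foldl_cons, List.map_cons, strJoin, foldl_append_strJoin f xs]
    rw [String.append_assoc]

/-- While every element differs from `N`, each outer-loop step appends `block ++ sep`. -/
theorem prefix_fold (block sep : String) (N : Int) : ∀ (l : List Int) (acc : String),
    (∀ i ∈ l, i ≠ N) →
    l.foldl (fun a i => if i ≠ N then a ++ block ++ sep else a ++ block) acc
      = acc ++ strJoin (List.replicate l.length (block ++ sep))
  | [], acc, _ => by simp [strJoin]
  | x :: xs, acc, h => by
    have hx : x ≠ N := h x (List.mem_cons_self)
    simp only [List.foldl_cons, if_pos hx, List.length_cons, List.replicate_succ, strJoin]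
    rw [prefix_fold block sep N xs _ (fun i hi => h i (List.mem_cons_of_mem _ hi))]
    simp [String.append_assoc]

theorem joinSep_replicate (sep block : String) : ∀ (n : Nat),
    joinSep sep (List.replicate (n + 1) block)
      = strJoin (List.replicate n (block ++ sep)) ++ block
  | 0 => by simp [joinSep, strJoin]
  | n + 1 => by
    have h2 : List.replicate (n + 1) block = block :: List.replicate n block :=
      List.replicate_succ ..
    rw [List.replicate_succ, h2, joinSep, ← h2, joinSep_replicate sep block n]
    simp [List.replicate_succ, strJoin, String.append_assoc]

/-- Outer loop of A for a nonnegative count equals the separator-join of repeated blocks. -/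
theorem outer_fold (block sep : String) (n : Nat) (acc : String) :
    (PySem.List.pyRange 0 ((n : Int) + 1) 1).foldl
        (fun a i => if i ≠ (n : Int) then a ++ block ++ sep else a ++ block) acc
      = acc ++ joinSep sep (List.replicate (n + 1) block) := by
  rw [PySem.List.pyRange_one_succ_right (by exact_mod_cast Int.natCast_nonneg n)]
  rw [List.foldl_append]
  rw [prefix_fold block sep (n : Int) _ acc
      (fun i hi => by
        have := (PySem.List.mem_pyRange_one.mp hi).2
        omega)]
  have hlen : (PySem.List.pyRange 0 (n : Int) 1).length = n := by
    rw [PySem.List.length_pyRange_one]; omega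
  rw [hlen]
  simp only [List.foldl_cons, List.foldl_nil, if_neg (by simp : ¬ ((n : Int) ≠ (n : Int)))]
  rw [joinSep_replicate, String.append_assoc]

/-- A's outer loop, with its inner loop and conditional, as a separator-join. -/
theorem outerA (n : Nat) (m : Int) (acc : String) :
    (PySem.List.pyRange 0 ((n : Int) + 1) 1).foldl
      (fun a x => if x ≠ (n : Int) then
          (PySem.List.pyRange 0 (m + 1) 1).foldl
            (fun a j => a ++ (PySem.Int.toStr j ++ " - " ++ prOption)) (a ++ prSelect)
            ++ (prInvalid ++ PySem.Int.toStr m ++ "\\n")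
        else
          (PySem.List.pyRange 0 (m + 1) 1).foldl
            (fun a j => a ++ (PySem.Int.toStr j ++ " - " ++ prOption)) (a ++ prSelect)) acc
    = acc ++ joinSep (prInvalid ++ PySem.Int.toStr m ++ "\\n")
        (List.replicate (n + 1) (prSelect ++ strJoin ((PySem.List.pyRange 0 (m + 1) 1).map
          (fun j => PySem.Int.toStr j ++ " - " ++ prOption)))) := by
  have hfun : (fun (a : String) (x : Int) => if x ≠ (n : Int) then
          (PySem.List.pyRange 0 (m + 1) 1).foldl
            (fun a j => a ++ (PySem.Int.toStr j ++ " - " ++ prOption)) (a ++ prSelect)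
            ++ (prInvalid ++ PySem.Int.toStr m ++ "\\n")
        else
          (PySem.List.pyRange 0 (m + 1) 1).foldl
            (fun a j => a ++ (PySem.Int.toStr j ++ " - " ++ prOption)) (a ++ prSelect))
      = (fun (a : String) (x : Int) => if x ≠ (n : Int) then
          a ++ (prSelect ++ strJoin ((PySem.List.pyRange 0 (m + 1) 1).map
            (fun j => PySem.Int.toStr j ++ " - " ++ prOption)))
            ++ (prInvalid ++ PySem.Int.toStr m ++ "\\n")
        else
          a ++ (prSelect ++ strJoin ((PySem.List.pyRange 0 (m + 1) 1).map
            (fun j => PySem.Int.toStr j ++ " - " ++ prOption)))) := by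
    funext a x
    by_cases hx : x ≠ (n : Int) <;>
      simp [hx, foldl_append_strJoin, String.append_assoc]
  rw [hfun, outer_fold]

theorem ports_agree (t i m : Int) :
    setup_plot_regex_generator_py t i m = setup_plot_regex_generator_py_alt t i m := by
  unfold setup_plot_regex_generator_py setup_plot_regex_generator_py_alt
  simp only []
  have htitles : (PySem.List.pyRange 0 (t + 1) 1).foldl (fun acc _ => acc ++ prTitles) prStart
      = prStart ++ strRepeat prTitles (t + 1) := by
    rw [foldl_append_strJoin (fun _ => prTitles), List.map_const', PySem.List.length_pyRange_one]
    simp [strRepeat]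
  rw [htitles]
  by_cases hi : 0 ≤ i
  · obtain ⟨n, hn⟩ := Int.eq_ofNat_of_zero_le hi
    subst hn
    rw [outerA n m, if_pos (by omega : (n : Int) + 1 > 0)]
    have h1 : ((n : Int) + 1).toNat = n + 1 := by omega
    rw [h1]
  · rw [PySem.List.pyRange_one_eq_nil (by omega : i + 1 ≤ 0),
      if_neg (by omega : ¬ i + 1 > 0)]
    simp [String.append_assoc]

-- ===== VERDICT (by name: the statement is the Claim_ definition above) =====
theorem setup_plot_regex_generator_py_spec : Claim_equal_setup_plot_regex_generator_py := by
  intro t i m _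
  unfold Spec_setup_plot_regex_generator_py
  exact ports_agree t i m
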